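-- pv_equiv track=rewrite | github.com/GizawAAiT/Codeforces | C_Find_and_Replace.py | solve
-- ===== SOURCE A (Python) =====
-- def solve(s):
--     dic = {}
--     for idx in range(len(s)):
--         parity = idx%2
--         if s[idx] not in dic:
--             dic[s[idx]] = parity
--
--         elif dic[s[idx]] != parity:
--             return "NO"
--
--     return "YES"
-- ===== SOURCE B (Python) =====
-- def solve(s):
--     evens = set(s[::2])
--     odds = set(s[1::2])
--     return "YES" if evens.isdisjoint(odds) else "NO"
-- ===== Notes on version B (the rewrite author's own statement) =====
-- stated objective: simpler
-- what changed: Replaces the interleaved indexed pass with an early-return parity dict by two grouped slices collected into sets plus one disjointness test.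
import Mathlib
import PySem

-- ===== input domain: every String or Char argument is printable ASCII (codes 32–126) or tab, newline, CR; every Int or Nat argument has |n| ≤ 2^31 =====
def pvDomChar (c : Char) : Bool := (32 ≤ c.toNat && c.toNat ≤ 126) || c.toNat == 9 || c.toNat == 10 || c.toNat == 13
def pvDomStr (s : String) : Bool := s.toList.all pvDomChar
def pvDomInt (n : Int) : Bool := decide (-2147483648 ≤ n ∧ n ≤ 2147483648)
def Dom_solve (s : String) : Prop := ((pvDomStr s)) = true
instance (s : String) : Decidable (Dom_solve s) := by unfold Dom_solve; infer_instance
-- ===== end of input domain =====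

-- B replaces A's single interleaved dict-and-early-return pass by two grouped
-- slices collected into sets and one disjointness test (objective: simpler).

-- ===== PORT A =====
-- the for-loop over range(len(s)) with early return: recursion over the
-- remaining characters, carrying the current index and the dict
def solveGo (dic : PySem.Dict Char Int) (idx : Int) : List Char → String
  | [] => "YES"
  | c :: rest =>
    let parity := PySem.Int.mod idx 2
    match dic.get? c with
    | none => solveGo (dic.insert c parity) (idx + 1) rest
    | some q => if q ≠ parity then "NO" else solveGo dic (idx + 1) rest

def solve (s : String) : String := solveGo PySem.Dict.empty 0 s.toList

-- ===== PORT B =====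
-- hand port of the step-2 slice s[::2] (exact: the chars at offsets 0,2,4,…)
def everyOther : List Char → List Char
  | [] => []
  | [c] => [c]
  | c :: _ :: rest => c :: everyOther rest

def solve_alt (s : String) : String :=
  if PySem.Set.isdisjoint (PySem.Set.ofList (everyOther s.toList))
      (PySem.Set.ofList (everyOther (s.toList.drop 1))) then "YES" else "NO"

-- ===== PRECONDITION & SPEC =====
def Spec_solve (s : String) (out : String) : Prop := out = solve_alt s
instance (s : String) (out : String) : Decidable (Spec_solve s out) := by unfold Spec_solve; infer_instance

-- ===== CLAIM (what is proved, stated in full; the proofs are below) =====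
def Claim_equal_solve : Prop := ∀ (s : String), Dom_solve s → Spec_solve s (solve s)

-- ===== LEMMAS AND PROOFS =====

lemma mod2_succ_ne (idx : Int) : PySem.Int.mod (idx + 1) 2 ≠ PySem.Int.mod idx 2 := by
  simp [PySem.Int.mod, Int.fmod_eq_emod]; omega

lemma mod2_add_two (idx : Int) : PySem.Int.mod (idx + 1 + 1) 2 = PySem.Int.mod idx 2 := by
  simp [PySem.Int.mod, Int.fmod_eq_emod]; omega

-- loop invariant: solveGo returns "YES" iff the even-offset chars of the tail
-- are dict-consistent with parity idx%2, the odd-offset ones with (idx+1)%2,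
-- and the two groups are disjoint
def GoodA (d : PySem.Dict Char Int) (idx : Int) (ts : List Char) : Prop :=
  (∀ x ∈ everyOther ts, ∀ q, d.get? x = some q → q = PySem.Int.mod idx 2) ∧
  (∀ x ∈ everyOther ts.tail, ∀ q, d.get? x = some q → q = PySem.Int.mod (idx + 1) 2) ∧
  (∀ x ∈ everyOther ts, x ∉ everyOther ts.tail)

lemma everyOther_cons (c : Char) (rest : List Char) :
    everyOther (c :: rest) = c :: everyOther rest.tail := by
  cases rest <;> simp [everyOther]

lemma solveGo_yes_iff (ts : List Char) (d : PySem.Dict Char Int) (idx : Int) :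
    solveGo d idx ts = "YES" ↔ GoodA d idx ts := by
  induction ts generalizing d idx with
  | nil => simp [solveGo, GoodA, everyOther]
  | cons c rest ih =>
    have hne := mod2_succ_ne idx
    have hsucc := mod2_add_two idx
    cases hg : d.get? c with
    | none =>
      rw [show solveGo d idx (c :: rest)
            = solveGo (d.insert c (PySem.Int.mod idx 2)) (idx + 1) rest from by
          simp [solveGo, hg], ih]
      simp only [GoodA, everyOther_cons, List.tail_cons, List.mem_cons, hsucc]
      constructor
      · rintro ⟨h1, h2, h3⟩
        have hcE : c ∉ everyOther rest := by
          intro hc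
          exact hne (h1 c hc (PySem.Int.mod idx 2) (PySem.Dict.get?_insert_self ..)).symm
        refine ⟨?_, ?_, ?_⟩
        · rintro x (rfl | hx) q hq
          · rw [hg] at hq; cases hq
          · rcases eq_or_ne x c with rfl | hxc
            · rw [hg] at hq; cases hq
            · exact h2 x hx q (by rwa [PySem.Dict.get?_insert_of_ne _ _ hxc])
        · intro x hx q hq
          rcases eq_or_ne x c with rfl | hxc
          · exact absurd hx hcE
          · exact h1 x hx q (by rwa [PySem.Dict.get?_insert_of_ne _ _ hxc])
        · rintro x (rfl | hx) hx'
          · exact hcE hx'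
          · exact h3 x hx' hx
      · rintro ⟨h1, h2, h3⟩
        have hcE : c ∉ everyOther rest := h3 c (Or.inl rfl)
        refine ⟨?_, ?_, ?_⟩
        · intro x hx q hq
          rcases eq_or_ne x c with rfl | hxc
          · exact absurd hx hcE
          · rw [PySem.Dict.get?_insert_of_ne _ _ hxc] at hq
            exact h2 x hx q hq
        · intro x hx q hq
          rcases eq_or_ne x c with rfl | hxc
          · rw [PySem.Dict.get?_insert_self] at hq
            exact (Option.some_inj.mp hq).symm
          · rw [PySem.Dict.get?_insert_of_ne _ _ hxc] at hq
            exact h1 x (Or.inr hx) q hq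
        · intro x hx hx'
          exact h3 x (Or.inr hx') hx
    | some q =>
      rw [show solveGo d idx (c :: rest)
            = if q ≠ PySem.Int.mod idx 2 then "NO" else solveGo d (idx + 1) rest from by
          simp [solveGo, hg]]
      by_cases hq : q = PySem.Int.mod idx 2
      · subst hq
        rw [if_neg (by simp), ih]
        simp only [GoodA, everyOther_cons, List.tail_cons, List.mem_cons, hsucc]
        constructor
        · rintro ⟨h1, h2, h3⟩
          have hcE : c ∉ everyOther rest := by
            intro hc
            exact hne (h1 c hc _ hg).symm
          refine ⟨?_, ?_, ?_⟩
          · rintro x (rfl | hx) r hr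
            · rw [hg] at hr; exact (Option.some_inj.mp hr).symm
            · exact h2 x hx r hr
          · exact h1
          · rintro x (rfl | hx) hx'
            · exact hcE hx'
            · exact h3 x hx' hx
        · rintro ⟨h1, h2, h3⟩
          exact ⟨h2, fun x hx r hr => h1 x (Or.inr hx) r hr,
            fun x hx hx' => h3 x (Or.inr hx') hx⟩
      · rw [if_pos (by simpa using hq)]
        simp only [GoodA, everyOther_cons, List.tail_cons, List.mem_cons]
        constructor
        · intro h; simp at h
        · rintro ⟨h1, _, _⟩
          exact absurd (h1 c (Or.inl rfl) q hg) hq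

lemma solveGo_yes_or_no (ts : List Char) (d : PySem.Dict Char Int) (idx : Int) :
    solveGo d idx ts = "YES" ∨ solveGo d idx ts = "NO" := by
  induction ts generalizing d idx with
  | nil => left; rfl
  | cons c rest ih =>
    cases hg : d.get? c with
    | none =>
      rw [show solveGo d idx (c :: rest)
            = solveGo (d.insert c (PySem.Int.mod idx 2)) (idx + 1) rest from by
          simp [solveGo, hg]]
      exact ih ..
    | some q =>
      rw [show solveGo d idx (c :: rest)
            = if q ≠ PySem.Int.mod idx 2 then "NO" else solveGo d (idx + 1) rest from by
          simp [solveGo, hg]]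
      split
      · right; rfl
      · exact ih ..

lemma good_empty_iff (ts : List Char) :
    GoodA PySem.Dict.empty 0 ts ↔ ∀ x ∈ everyOther ts, x ∉ everyOther ts.tail := by
  unfold GoodA
  simp [PySem.Dict.get?_empty]

-- ===== VERDICT (by name: the statement is the Claim_ definition above) =====
theorem solve_spec : Claim_equal_solve := by
  intro s _
  show solve s = solve_alt s
  unfold solve solve_alt
  rw [List.drop_one]
  by_cases hP : ∀ x ∈ everyOther s.toList, x ∉ everyOther s.toList.tail
  · rw [if_pos ((PySem.Set.isdisjoint_iff _ _).mpr (fun x hx hx' =>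
      hP x ((PySem.Set.mem_ofList _ _).mp hx) ((PySem.Set.mem_ofList _ _).mp hx')))]
    exact (solveGo_yes_iff ..).mpr ((good_empty_iff _).mpr hP)
  · rw [if_neg (fun hd => hP (fun x hx hx' =>
      (PySem.Set.isdisjoint_iff _ _).mp hd x
        ((PySem.Set.mem_ofList _ _).mpr hx) ((PySem.Set.mem_ofList _ _).mpr hx')))]
    rcases solveGo_yes_or_no s.toList PySem.Dict.empty 0 with h | h
    · exact absurd ((good_empty_iff _).mp ((solveGo_yes_iff ..).mp h)) hP
    · exact h
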